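-- pv_equiv track=rewrite | github.com/timbernat/polymerist | polymerist/maths/digits.py | int_to_factoradic
-- ===== SOURCE A (Python) =====
-- def int_to_factoradic(n : int) -> list[int]:
--     '''Determine the digits of the factorial base representation of an integer'''
--     if n < 0:
--         raise ValueError('Cannot generate factoradic digits of a negative integer')
--     if n == 0:
--         return [0]
--
--     digits : list[int] = []
--     quotient, divisor = n, 1
--     while quotient > 0:
--         quotient, digit = divmod(quotient, divisor)
--         digits.append(digit)
--         divisor += 1
--     return digits[::-1]
-- ===== SOURCE B (Python) =====
-- def int_to_factoradic(n : int) -> list[int]: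
--     '''Determine the digits of the factorial base representation of an integer'''
--     if n < 0:
--         raise ValueError('Cannot generate factoradic digits of a negative integer')
--     if n == 0:
--         return [0]
--
--     # find the largest m with m! <= n, keeping f = m!
--     m, f = 1, 1
--     while f * (m + 1) <= n:
--         m += 1
--         f *= m
--     # descend from the m!-place to the 1!-place, most-significant digit first
--     digits : list[int] = []
--     rem, i = n, m
--     while i > 0:
--         digits.append(rem // f)
--         rem %= f
--         f //= i
--         i -= 1
--     digits.append(0)  # the 0!-place is always 0
--     return digits
-- ===== Notes on version B (the rewrite author's own statement) =====
-- stated objective: alternative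
-- what changed: Instead of repeatedly dividing by 1,2,3,... while collecting digits and reversing at the end, B first finds the largest m with m! <= n (maintaining f = m!) and then emits digits most-significant first by dividing the remainder by descending factorial place values, appending the trailing 0!-place digit last.
import Mathlib
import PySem

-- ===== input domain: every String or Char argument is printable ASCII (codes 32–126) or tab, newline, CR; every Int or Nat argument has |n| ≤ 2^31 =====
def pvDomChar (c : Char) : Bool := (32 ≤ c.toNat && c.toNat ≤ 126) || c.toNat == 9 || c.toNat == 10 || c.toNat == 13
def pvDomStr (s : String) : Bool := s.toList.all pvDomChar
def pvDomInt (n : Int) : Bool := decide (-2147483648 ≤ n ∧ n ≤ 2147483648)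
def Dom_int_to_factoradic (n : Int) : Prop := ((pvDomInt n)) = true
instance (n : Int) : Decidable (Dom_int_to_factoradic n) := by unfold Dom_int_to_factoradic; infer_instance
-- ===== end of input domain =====

-- B replaces A's divide-by-1,2,3,…-then-reverse loop by finding the largest m with m! ≤ n and
-- emitting digits most-significant first by descending factorial place values (objective: alternative).

-- ===== PORT A =====
-- A's while-loop; quotient and divisor stay nonnegative for n ≥ 0 (all of Pre_), so Nat
-- division/modulo coincide with Python's divmod here — exact on the admitted domain.
def pvLoopA (q d : Nat) (digits : List Int) : List Int :=
  if hq : 0 < q then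
    pvLoopA (q / d) (d + 1) (digits ++ [((q % d : Nat) : Int)])
  else digits
termination_by 2 * q + (if d ≤ 1 then 1 else 0)
decreasing_by
  have h0 : d = 0 ∨ d = 1 ∨ 2 ≤ d := by omega
  rcases h0 with rfl | rfl | hd
  · simpa [Nat.div_zero] using hq
  · simp
  · have h2 := Nat.div_lt_self hq (by omega : 1 < d)
    split_ifs <;> omega

def int_to_factoradic (n : Int) : List Int :=
  if n < 0 then []                       -- ValueError in Python: excluded by Pre_
  else if n = 0 then [0]
  else (pvLoopA n.toNat 1 []).reverse    -- digits[::-1] (PySem.List.slice?_none_none_neg_one: [::-1] is reverse)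

-- ===== PORT B =====
-- first while-loop of B: grow (m, f = m!) while f*(m+1) ≤ N; fuel only makes it total (m ≤ N always)
def pvFind (N : Nat) : Nat → Nat → Nat → Nat × Nat
  | 0, m, f => (m, f)
  | fuel+1, m, f => if f * (m + 1) ≤ N then pvFind N fuel (m + 1) (f * (m + 1)) else (m, f)

-- second while-loop of B: descend i = m, …, 1 with rem and f = i!
def pvDesc (i : Nat) (rem f : Nat) (digits : List Int) : List Int :=
  match i with
  | 0 => digits
  | i+1 => pvDesc i (rem % f) (f / (i + 1)) (digits ++ [((rem / f : Nat) : Int)])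

def int_to_factoradic_alt (n : Int) : List Int :=
  if n < 0 then []                       -- ValueError in Python: excluded by Pre_
  else if n = 0 then [0]
  else
    pvDesc (pvFind n.toNat n.toNat 1 1).1 n.toNat (pvFind n.toNat n.toNat 1 1).2 [] ++ [0]

-- ===== PRECONDITION & SPEC =====
-- Pre_ excludes exactly n < 0, where the Python A raises ValueError.
def Pre_int_to_factoradic (n : Int) : Prop := 0 ≤ n
instance (n : Int) : Decidable (Pre_int_to_factoradic n) := by unfold Pre_int_to_factoradic; infer_instance
def pvWitness_int_to_factoradic : Int := (7)

def Spec_int_to_factoradic (n : Int) (out : List Int) : Prop := out = int_to_factoradic_alt n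
instance (n : Int) (out : List Int) : Decidable (Spec_int_to_factoradic n out) := by unfold Spec_int_to_factoradic; infer_instance

-- ===== CLAIM (what is proved, stated in full; the proofs are below) =====
def Claim_equal_int_to_factoradic : Prop := ∀ (n : Int), Dom_int_to_factoradic n → Pre_int_to_factoradic n → Spec_int_to_factoradic n (int_to_factoradic n)

-- ===== LEMMAS AND PROOFS =====

-- pvFind, started at (m, m!), ends at (M, M!) with M! ≤ N < (M+1)!
lemma pvFind_spec (N : Nat) : ∀ (fuel m : Nat), m.factorial ≤ N → N < (m + fuel + 1).factorial →
    ∃ M : Nat, pvFind N fuel m m.factorial = (M, M.factorial) ∧ M.factorial ≤ N ∧ N < (M + 1).factorial := by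
  intro fuel
  induction fuel with
  | zero =>
    intro m h1 h2
    exact ⟨m, rfl, h1, h2⟩
  | succ fuel ih =>
    intro m h1 h2
    have hfs : m.factorial * (m + 1) = (m + 1).factorial := by
      rw [Nat.factorial_succ, Nat.mul_comm]
    rw [pvFind]
    by_cases hc : m.factorial * (m + 1) ≤ N
    · rw [if_pos hc, hfs]
      exact ih (m + 1) (hfs ▸ hc) (by have : m + 1 + fuel + 1 = m + (fuel + 1) + 1 := by omega
                                      rw [this]; exact h2)
    · rw [if_neg hc]
      exact ⟨m, rfl, h1, by rw [← hfs]; omega⟩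

-- characterisation of A's loop: from state (N / j!, j+1) it appends the place digits j, j+1, …, M
lemma pvLoopA_spec (N M : Nat) (hM1 : M.factorial ≤ N) (hM2 : N < (M + 1).factorial) :
    ∀ (c j : Nat) (acc : List Int), M + 1 = j + c →
    pvLoopA (N / j.factorial) (j + 1) acc
      = acc ++ (List.range' j c).map (fun t => ((N / t.factorial % (t + 1) : Nat) : Int)) := by
  intro c
  induction c with
  | zero =>
    intro j acc hj
    have hj' : j = M + 1 := by omega
    subst hj'
    have h0 : N / (M + 1).factorial = 0 := Nat.div_eq_of_lt hM2
    rw [pvLoopA, h0]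
    simp
  | succ c ih =>
    intro j acc hj
    have hjM : j ≤ M := by omega
    have hle : j.factorial ≤ N := le_trans (Nat.factorial_le hjM) hM1
    have hq : 0 < N / j.factorial := Nat.div_pos hle j.factorial_pos
    rw [pvLoopA, dif_pos hq]
    have harg : N / j.factorial / (j + 1) = N / (j + 1).factorial := by
      rw [Nat.div_div_eq_div_mul, Nat.factorial_succ, Nat.mul_comm]
    rw [harg, ih (j + 1) _ (by omega), List.range'_succ]
    simp

-- characterisation of B's descending loop: from (i, N % (i+1)!, i!) it appends places i, i-1, …, 1
lemma pvDesc_spec (N : Nat) : ∀ (i : Nat) (acc : List Int),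
    pvDesc i (N % (i + 1).factorial) i.factorial acc
      = acc ++ ((List.range' 1 i).reverse.map
          (fun t => ((N % (t + 1).factorial / t.factorial : Nat) : Int))) := by
  intro i
  induction i with
  | zero => intro acc; simp [pvDesc]
  | succ i ih =>
    intro acc
    rw [pvDesc]
    have h1 : N % (i + 1 + 1).factorial % (i + 1).factorial = N % (i + 1).factorial :=
      Nat.mod_mod_of_dvd N (Nat.factorial_dvd_factorial (by omega))
    have h2 : (i + 1).factorial / (i + 1) = i.factorial := by
      rw [Nat.factorial_succ]; exact Nat.mul_div_cancel_left _ (by omega)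
    rw [h1, h2, ih, List.range'_concat]
    simp
    rw [Nat.add_comm 1 i]

-- A's place digit equals B's place digit at every place t
lemma pv_digit_eq (N t : Nat) :
    N / t.factorial % (t + 1) = N % (t + 1).factorial / t.factorial := by
  rw [← Nat.mod_mul_right_div_self, Nat.factorial_succ, Nat.mul_comm]

-- ===== VERDICT (by name: the statement is the Claim_ definition above) =====
theorem int_to_factoradic_spec : Claim_equal_int_to_factoradic := by
  intro n _ hpre
  unfold Pre_int_to_factoradic at hpre
  unfold Spec_int_to_factoradic int_to_factoradic int_to_factoradic_alt
  have hn0 : ¬ n < 0 := by omega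
  rw [if_neg hn0, if_neg hn0]
  by_cases hz : n = 0
  · rw [if_pos hz, if_pos hz]
  · rw [if_neg hz, if_neg hz]
    have hN1 : 1 ≤ n.toNat := by omega
    obtain ⟨M, hfind, hM1, hM2⟩ :=
      pvFind_spec n.toNat n.toNat 1 (by simpa [Nat.factorial] using hN1)
        (lt_of_lt_of_le (by omega) (Nat.self_le_factorial _))
    have hfind' : pvFind n.toNat n.toNat 1 1 = (M, M.factorial) := by
      simpa [Nat.factorial] using hfind
    rw [hfind']
    have hA := pvLoopA_spec n.toNat M hM1 hM2 (M + 1) 0 [] (by omega)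
    simp only [Nat.factorial_zero, Nat.div_one, Nat.zero_add, List.nil_append] at hA
    have hD := pvDesc_spec n.toNat M []
    rw [Nat.mod_eq_of_lt hM2] at hD
    simp only [List.nil_append] at hD
    rw [hA]
    simp only []
    rw [hD]
    rw [List.range'_succ]
    simp [List.map_reverse, pv_digit_eq]
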